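-- pv_equiv track=rewrite | github.com/replit-discord/all-seeing-bot | utils.py | index_args
-- ===== SOURCE A (Python) =====
-- def index_args(args):
-- 	indexed = [[]]
--
-- 	for arg in args:
-- 		if not arg.startswith('-'):
-- 			indexed[-1].append(arg)
-- 		else:
-- 			indexed.append([arg])
-- 	return indexed
-- ===== SOURCE B (Python) =====
-- def index_args(args):
--     flags = [i for i, a in enumerate(args) if a.startswith('-')]
--     starts = [0] + flags
--     ends = flags + [len(args)]
--     return [list(args[s:e]) for s, e in zip(starts, ends)]
-- ===== Notes on version B (the rewrite author's own statement) =====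
-- stated objective: alternative
-- what changed: Replaces the per-element append-to-last-group loop with an index-first pass: collect the flag positions, then slice args between consecutive boundaries.
import Mathlib
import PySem

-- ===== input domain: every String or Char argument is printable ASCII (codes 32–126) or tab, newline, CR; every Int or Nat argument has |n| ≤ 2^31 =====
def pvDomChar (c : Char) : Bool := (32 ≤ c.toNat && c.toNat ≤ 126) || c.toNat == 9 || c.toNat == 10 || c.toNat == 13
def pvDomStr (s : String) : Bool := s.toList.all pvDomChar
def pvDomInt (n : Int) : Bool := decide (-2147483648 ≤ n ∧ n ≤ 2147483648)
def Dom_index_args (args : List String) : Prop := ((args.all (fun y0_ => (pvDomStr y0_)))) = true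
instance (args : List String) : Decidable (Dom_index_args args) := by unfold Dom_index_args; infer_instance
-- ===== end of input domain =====

-- B groups args by leading-dash flags via flag positions and boundary slices instead of A's
-- append-to-last-group loop; same cost, alternative decomposition. Return-value equivalence only.

-- ===== PORT A =====
-- loop body of A: append to the last group, or start a new group at a flag
def stepA (indexed : List (List String)) (arg : String) : List (List String) :=
  if ¬ (PySem.Str.startswith arg "-") then
    indexed.dropLast ++ [(indexed.getLast?.getD []) ++ [arg]]
  else
    indexed ++ [[arg]]

def index_args (args : List String) : List (List String) :=
  args.foldl stepA [[]]

-- ===== PORT B =====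
def index_args_alt (args : List String) : List (List String) :=
  let flags := ((PySem.List.enumerate args).filter
    (fun p => PySem.Str.startswith p.2 "-")).map (fun p => p.1)
  let starts := (0 : Int) :: flags
  let ends := flags ++ [(args.length : Int)]
  (starts.zip ends).map (fun p => PySem.List.slice args (some p.1) (some p.2))

-- ===== PRECONDITION & SPEC =====
def Spec_index_args (args : List String) (out : List (List String)) : Prop := out = index_args_alt args
instance (args : List String) (out : List (List String)) : Decidable (Spec_index_args args out) := by unfold Spec_index_args; infer_instance

-- ===== CLAIM (what is proved, stated in full; the proofs are below) =====
def Claim_equal_index_args : Prop := ∀ (args : List String), Dom_index_args args → Spec_index_args args (index_args args)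

-- ===== LEMMAS AND PROOFS =====

-- the common recursive characterisation both ports are reduced to
def mapHead (f : List String → List String) : List (List String) → List (List String)
  | [] => []
  | g :: gs => f g :: gs

def S : List String → List (List String)
  | [] => [[]]
  | x :: xs =>
    if PySem.Str.startswith x "-" then [] :: mapHead (x :: ·) (S xs)
    else mapHead (x :: ·) (S xs)

def flagsN : List String → List Nat
  | [] => []
  | x :: xs => (if PySem.Str.startswith x "-" then [0] else []) ++ (flagsN xs).map (· + 1)

theorem S_cons_flag (x : String) (xs : List String) (h : PySem.Str.startswith x "-" = true) :
    S (x :: xs) = [] :: mapHead (x :: ·) (S xs) := by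
  conv_lhs => rw [S]
  rw [if_pos h]

theorem S_cons_nonflag (x : String) (xs : List String) (h : ¬ PySem.Str.startswith x "-" = true) :
    S (x :: xs) = mapHead (x :: ·) (S xs) := by
  conv_lhs => rw [S]
  rw [if_neg h]

theorem flagsN_cons_flag (x : String) (xs : List String) (h : PySem.Str.startswith x "-" = true) :
    flagsN (x :: xs) = 0 :: (flagsN xs).map (· + 1) := by
  conv_lhs => rw [flagsN]
  rw [if_pos h]
  rfl

theorem flagsN_cons_nonflag (x : String) (xs : List String) (h : ¬ PySem.Str.startswith x "-" = true) :
    flagsN (x :: xs) = (flagsN xs).map (· + 1) := by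
  conv_lhs => rw [flagsN]
  rw [if_neg h]
  rfl

theorem mapHead_mapHead (f g : List String → List String) (t : List (List String)) :
    mapHead f (mapHead g t) = mapHead (fun h => f (g h)) t := by
  cases t <;> simp [mapHead]

theorem mapHead_nil_append (t : List (List String)) :
    mapHead (fun h => [] ++ h) t = t := by
  cases t <;> simp [mapHead]

-- ===== A-side =====

theorem stepA_flag (acc : List (List String)) (arg : String)
    (h : PySem.Str.startswith arg "-" = true) :
    stepA acc arg = acc ++ [[arg]] := by
  unfold stepA; rw [if_neg (not_not_intro h)]

theorem stepA_nonflag (acc : List (List String)) (l : List String) (arg : String)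
    (h : ¬ PySem.Str.startswith arg "-" = true) :
    stepA (acc ++ [l]) arg = acc ++ [l ++ [arg]] := by
  unfold stepA
  rw [if_pos h, List.dropLast_concat, List.getLast?_concat]
  rfl

theorem foldlA_append (xs : List String) :
    ∀ (acc : List (List String)) (l : List String),
      xs.foldl stepA (acc ++ [l]) = acc ++ xs.foldl stepA [l] := by
  induction xs with
  | nil => intro acc l; simp
  | cons x xs ih =>
    intro acc l
    by_cases h : PySem.Str.startswith x "-" = true
    · rw [List.foldl_cons, stepA_flag _ _ h, List.foldl_cons, stepA_flag _ _ h,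
        ih (acc ++ [l]) [x]]
      have : ([l] : List (List String)) ++ [[x]] = [l] ++ [[x]] := rfl
      rw [show ([l] : List (List String)) ++ [[x]] = [] ++ [l] ++ [[x]] from rfl,
        ih ([] ++ [l]) [x]]
      simp
    · rw [List.foldl_cons, stepA_nonflag acc l _ h, List.foldl_cons,
        show ([l] : List (List String)) = [] ++ [l] from rfl,
        stepA_nonflag [] l _ h, ih acc (l ++ [x])]
      simp

theorem foldlA_eq_S (xs : List String) :
    ∀ l : List String, xs.foldl stepA [l] = mapHead (l ++ ·) (S xs) := by
  induction xs with
  | nil => intro l; simp [S, mapHead]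
  | cons x xs ih =>
    intro l
    by_cases h : PySem.Str.startswith x "-" = true
    · rw [List.foldl_cons, stepA_flag _ _ h,
        show ([l] : List (List String)) ++ [[x]] = [l] ++ [[x]] from rfl,
        foldlA_append xs [l] [x], ih [x], S_cons_flag _ _ h]
      cases hS : S xs <;> simp [mapHead]
    · rw [List.foldl_cons,
        show ([l] : List (List String)) = [] ++ [l] from rfl,
        stepA_nonflag [] l _ h, List.nil_append, ih (l ++ [x]),
        S_cons_nonflag _ _ h, mapHead_mapHead]
      cases hS : S xs <;> simp [mapHead]

theorem A_eq_S (xs : List String) : index_args xs = S xs := by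
  rw [index_args, foldlA_eq_S xs [], mapHead_nil_append]

-- ===== B-side =====

-- B re-expressed with Nat flag positions and drop/take slices
def Bn (xs : List String) : List (List String) :=
  ((0 :: flagsN xs).zip (flagsN xs ++ [xs.length])).map
    (fun p => (xs.drop p.1).take (p.2 - p.1))

theorem enum_filter_flags (xs : List String) :
    ∀ s : Int, ((PySem.List.enumerate xs s).filter
        (fun p => PySem.Str.startswith p.2 "-")).map (fun p => p.1)
      = (flagsN xs).map (fun k : Nat => s + (k : Int)) := by
  induction xs with
  | nil => intro s; rw [PySem.List.enumerate_nil]; rfl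
  | cons x xs ih =>
    intro s
    rw [PySem.List.enumerate_cons, List.filter_cons]
    by_cases h : PySem.Str.startswith x "-" = true
    · rw [if_pos (by exact h), List.map_cons, ih (s + 1), flagsN_cons_flag _ _ h,
        List.map_cons, List.map_map]
      refine List.cons_eq_cons.mpr ⟨by omega, ?_⟩
      apply List.map_congr_left
      intro k _
      simp only [Function.comp_apply]
      push_cast
      ring
    · rw [if_neg (by simpa using h), ih (s + 1), flagsN_cons_nonflag _ _ h, List.map_map]
      apply List.map_congr_left
      intro k _
      simp only [Function.comp_apply]
      push_cast
      ring

theorem alt_eq_Bn (xs : List String) : index_args_alt xs = Bn xs := by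
  show (((0 : Int) :: ((PySem.List.enumerate xs 0).filter
        (fun p => PySem.Str.startswith p.2 "-")).map (fun p => p.1)).zip
      ((((PySem.List.enumerate xs 0).filter
        (fun p => PySem.Str.startswith p.2 "-")).map (fun p => p.1)) ++ [(xs.length : Int)])).map
      (fun p => PySem.List.slice xs (some p.1) (some p.2)) = Bn xs
  rw [enum_filter_flags xs 0]
  have hflags : (flagsN xs).map (fun k : Nat => (0 : Int) + (k : Int))
      = (flagsN xs).map (fun k : Nat => (k : Int)) := by
    apply List.map_congr_left; intro k _; omega
  rw [hflags,
    show (0 : Int) :: (flagsN xs).map (fun k : Nat => (k : Int))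
      = (0 :: flagsN xs).map (fun k : Nat => (k : Int)) by simp,
    show (flagsN xs).map (fun k : Nat => (k : Int)) ++ [((xs.length : Nat) : Int)]
      = (flagsN xs ++ [xs.length]).map (fun k : Nat => (k : Int)) by simp,
    List.zip_map, List.map_map]
  apply List.map_congr_left
  intro p _
  simp [Prod.map, PySem.List.slice_natCast]

theorem zip_map_succ (x : String) (xs : List String) (L M : List Nat) :
    ((L.map (· + 1)).zip (M.map (· + 1))).map
        (fun p => ((x :: xs).drop p.1).take (p.2 - p.1))
      = (L.zip M).map (fun p => (xs.drop p.1).take (p.2 - p.1)) := by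
  rw [List.zip_map, List.map_map]
  apply List.map_congr_left
  intro p _
  simp [Prod.map, Nat.succ_sub_succ]

theorem boundary_cons (x : String) (xs : List String) (F : List Nat) (n : Nat) :
    ((0 :: F.map (· + 1)).zip (F.map (· + 1) ++ [n + 1])).map
        (fun p => ((x :: xs).drop p.1).take (p.2 - p.1))
      = mapHead (x :: ·)
          (((0 :: F).zip (F ++ [n])).map (fun p => (xs.drop p.1).take (p.2 - p.1))) := by
  cases F with
  | nil => simp [mapHead]
  | cons f rest =>
    rw [show (f :: rest).map (· + 1) ++ [n + 1] = ((f :: rest) ++ [n + 1 - 1]).map (· + 1) by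
        simp]
    rw [show ((0 :: (f :: rest).map (· + 1)).zip (((f :: rest) ++ [n + 1 - 1]).map (· + 1)))
        = (0, f + 1) :: (((f :: rest).map (· + 1)).zip ((rest ++ [n + 1 - 1]).map (· + 1))) by
        simp]
    rw [List.map_cons, zip_map_succ x xs (f :: rest) (rest ++ [n + 1 - 1])]
    simp [mapHead, List.take_succ_cons]

theorem Bn_eq_S (xs : List String) : Bn xs = S xs := by
  induction xs with
  | nil => simp [Bn, flagsN, S]
  | cons x xs ih =>
    by_cases h : PySem.Str.startswith x "-" = true
    · rw [Bn, flagsN_cons_flag _ _ h, List.length_cons]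
      rw [show ((0 :: 0 :: (flagsN xs).map (· + 1)).zip
            ((0 :: (flagsN xs).map (· + 1)) ++ [xs.length + 1]))
          = (0, 0) :: ((0 :: (flagsN xs).map (· + 1)).zip
            ((flagsN xs).map (· + 1) ++ [xs.length + 1])) by simp]
      rw [List.map_cons, boundary_cons x xs (flagsN xs) xs.length]
      rw [show (((0 :: flagsN xs).zip (flagsN xs ++ [xs.length])).map
            (fun p => (xs.drop p.1).take (p.2 - p.1))) = Bn xs from rfl, ih,
        S_cons_flag _ _ h]
      rfl
    · rw [Bn, flagsN_cons_nonflag _ _ h, List.length_cons,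
        boundary_cons x xs (flagsN xs) xs.length]
      rw [show (((0 :: flagsN xs).zip (flagsN xs ++ [xs.length])).map
            (fun p => (xs.drop p.1).take (p.2 - p.1))) = Bn xs from rfl, ih,
        S_cons_nonflag _ _ h]

-- ===== VERDICT (by name: the statement is the Claim_ definition above) =====
theorem index_args_spec : Claim_equal_index_args := by
  intro args _
  show index_args args = index_args_alt args
  rw [A_eq_S, alt_eq_Bn, Bn_eq_S]
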